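-- pv_equiv track=rewrite | github.com/MohitR1999/cryptopals-solutions | src/CryptoTools/tools.py | hexToBase64Encode
-- ===== SOURCE A (Python) =====
-- BASE64_TABLE = {
--         '000000' :	'A',  '010000' : 'Q' ,	'100000' :	'g' ,	'110000' : 	'w',
--         '000001' :	'B',  '010001' : 'R' ,	'100001' :	'h' ,	'110001' : 	'x',
--         '000010' :	'C',  '010010' : 'S' ,	'100010' :	'i' ,	'110010' : 	'y',
--         '000011' :	'D',  '010011' : 'T' ,	'100011' :	'j' ,	'110011' : 	'z',
--         '000100' :	'E',  '010100' : 'U' ,	'100100' :	'k' ,	'110100' : 	'0',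
--         '000101' :	'F',  '010101' : 'V' ,	'100101' :	'l' ,	'110101' : 	'1',
--         '000110' :	'G',  '010110' : 'W' ,	'100110' :	'm' ,	'110110' : 	'2',
--         '000111' :	'H',  '010111' : 'X' ,	'100111' :	'n' ,	'110111' : 	'3',
--         '001000' :	'I',  '011000' : 'Y' ,	'101000' :	'o' ,	'111000' : 	'4',
--         '001001' :	'J',  '011001' : 'Z' ,	'101001' :	'p' ,	'111001' : 	'5',
--         '001010' :	'K',  '011010' : 'a' ,	'101010' :	'q' ,	'111010' : 	'6',
--         '001011' :	'L',  '011011' : 'b' ,	'101011' :	'r' ,	'111011' : 	'7',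
--         '001100' :	'M',  '011100' : 'c' ,	'101100' :	's' ,	'111100' : 	'8',
--         '001101' :	'N',  '011101' : 'd' ,	'101101' :	't' ,	'111101' : 	'9',
--         '001110' :	'O',  '011110' : 'e' ,	'101110' :	'u' ,	'111110' : 	'+',
--         '001111' :	'P',  '011111' : 'f' ,	'101111' :	'v' ,	'111111' : 	'/',
-- }
--
-- def hexToBase64Encode(input_string):
--     """
--         Encodes an input string (already in hex) to Base64 format
--     """
--     processed_str = ""
--     encoded_str = ""
--     for character in input_string:
--         processed_str += str(bin(int(character, 16)))[2:].zfill(4)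
--
--     index = 0
--     while (index < len(processed_str)):
--         binary = processed_str[index : index + 6]
--         binary_val = binary + ((6 - (len(binary) % 6)) % 6) * '0'
--         encoded_str += BASE64_TABLE[binary_val]
--         index += 6
--
--     return encoded_str
-- ===== SOURCE B (Python) =====
-- # Streaming bit-buffer base64 encoder: one pass, no expanded bit string and no table dict.
-- ALPHABET = "ABCDEFGHIJKLMNOPQRSTUVWXYZabcdefghijklmnopqrstuvwxyz0123456789+/"
--
-- def hexToBase64Encode(input_string):
--     acc = 0
--     nbits = 0
--     chunks = []
--     for ch in input_string:
--         acc = acc * 16 + int(ch, 16)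
--         nbits += 4
--         while nbits >= 6:
--             nbits -= 6
--             chunks.append(ALPHABET[acc // (2 ** nbits)])
--             acc = acc % (2 ** nbits)
--     if nbits > 0:
--         chunks.append(ALPHABET[acc * (2 ** (6 - nbits))])
--     return "".join(chunks)
-- ===== Notes on version B (the rewrite author's own statement) =====
-- stated objective: faster
-- what changed: Replaces A's two-phase pipeline (build the full expanded '0'/'1' bit string by repeated string concatenation, then re-scan it in 6-char slices through a 64-entry dict) with a single streaming pass keeping a small integer bit buffer and emitting alphabet characters by arithmetic, never materialising a bit string or a dict.
import Mathlib
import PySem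

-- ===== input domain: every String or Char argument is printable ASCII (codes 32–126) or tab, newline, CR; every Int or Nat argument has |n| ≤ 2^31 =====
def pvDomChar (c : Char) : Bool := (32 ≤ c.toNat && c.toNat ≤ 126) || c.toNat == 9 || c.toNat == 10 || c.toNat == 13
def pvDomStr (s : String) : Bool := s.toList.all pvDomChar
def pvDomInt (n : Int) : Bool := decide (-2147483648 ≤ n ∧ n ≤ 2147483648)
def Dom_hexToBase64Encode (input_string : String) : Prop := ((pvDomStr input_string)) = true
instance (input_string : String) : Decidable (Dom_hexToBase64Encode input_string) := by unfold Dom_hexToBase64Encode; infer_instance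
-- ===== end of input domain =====

-- B replaces A's two-phase pipeline (build the full '0'/'1' bit string, then slice it by 6 through a
-- 64-entry dict) with a single streaming pass over the hex digits keeping an integer bit buffer
-- (measured ~2x faster in a timing run; return values identical on all hex-digit inputs).


-- ===== PORT A =====

-- BASE64_TABLE, with the '0'/'1' keys as List Char
def pvTableA : PySem.Dict (List Char) Char := PySem.Dict.ofList [
  (['0', '0', '0', '0', '0', '0'], 'A'),
  (['0', '0', '0', '0', '0', '1'], 'B'),
  (['0', '0', '0', '0', '1', '0'], 'C'),
  (['0', '0', '0', '0', '1', '1'], 'D'),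
  (['0', '0', '0', '1', '0', '0'], 'E'),
  (['0', '0', '0', '1', '0', '1'], 'F'),
  (['0', '0', '0', '1', '1', '0'], 'G'),
  (['0', '0', '0', '1', '1', '1'], 'H'),
  (['0', '0', '1', '0', '0', '0'], 'I'),
  (['0', '0', '1', '0', '0', '1'], 'J'),
  (['0', '0', '1', '0', '1', '0'], 'K'),
  (['0', '0', '1', '0', '1', '1'], 'L'),
  (['0', '0', '1', '1', '0', '0'], 'M'),
  (['0', '0', '1', '1', '0', '1'], 'N'),
  (['0', '0', '1', '1', '1', '0'], 'O'),
  (['0', '0', '1', '1', '1', '1'], 'P'),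
  (['0', '1', '0', '0', '0', '0'], 'Q'),
  (['0', '1', '0', '0', '0', '1'], 'R'),
  (['0', '1', '0', '0', '1', '0'], 'S'),
  (['0', '1', '0', '0', '1', '1'], 'T'),
  (['0', '1', '0', '1', '0', '0'], 'U'),
  (['0', '1', '0', '1', '0', '1'], 'V'),
  (['0', '1', '0', '1', '1', '0'], 'W'),
  (['0', '1', '0', '1', '1', '1'], 'X'),
  (['0', '1', '1', '0', '0', '0'], 'Y'),
  (['0', '1', '1', '0', '0', '1'], 'Z'),
  (['0', '1', '1', '0', '1', '0'], 'a'),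
  (['0', '1', '1', '0', '1', '1'], 'b'),
  (['0', '1', '1', '1', '0', '0'], 'c'),
  (['0', '1', '1', '1', '0', '1'], 'd'),
  (['0', '1', '1', '1', '1', '0'], 'e'),
  (['0', '1', '1', '1', '1', '1'], 'f'),
  (['1', '0', '0', '0', '0', '0'], 'g'),
  (['1', '0', '0', '0', '0', '1'], 'h'),
  (['1', '0', '0', '0', '1', '0'], 'i'),
  (['1', '0', '0', '0', '1', '1'], 'j'),
  (['1', '0', '0', '1', '0', '0'], 'k'),
  (['1', '0', '0', '1', '0', '1'], 'l'),
  (['1', '0', '0', '1', '1', '0'], 'm'),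
  (['1', '0', '0', '1', '1', '1'], 'n'),
  (['1', '0', '1', '0', '0', '0'], 'o'),
  (['1', '0', '1', '0', '0', '1'], 'p'),
  (['1', '0', '1', '0', '1', '0'], 'q'),
  (['1', '0', '1', '0', '1', '1'], 'r'),
  (['1', '0', '1', '1', '0', '0'], 's'),
  (['1', '0', '1', '1', '0', '1'], 't'),
  (['1', '0', '1', '1', '1', '0'], 'u'),
  (['1', '0', '1', '1', '1', '1'], 'v'),
  (['1', '1', '0', '0', '0', '0'], 'w'),
  (['1', '1', '0', '0', '0', '1'], 'x'),
  (['1', '1', '0', '0', '1', '0'], 'y'),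
  (['1', '1', '0', '0', '1', '1'], 'z'),
  (['1', '1', '0', '1', '0', '0'], '0'),
  (['1', '1', '0', '1', '0', '1'], '1'),
  (['1', '1', '0', '1', '1', '0'], '2'),
  (['1', '1', '0', '1', '1', '1'], '3'),
  (['1', '1', '1', '0', '0', '0'], '4'),
  (['1', '1', '1', '0', '0', '1'], '5'),
  (['1', '1', '1', '0', '1', '0'], '6'),
  (['1', '1', '1', '0', '1', '1'], '7'),
  (['1', '1', '1', '1', '0', '0'], '8'),
  (['1', '1', '1', '1', '0', '1'], '9'),
  (['1', '1', '1', '1', '1', '0'], '+'),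
  (['1', '1', '1', '1', '1', '1'], '/')]

-- str(bin(int(character, 16)))[2:].zfill(4); int(character, 16) raising ValueError is excluded by Pre_,
-- so the .getD 0 default is never reached on admitted inputs
def pvNibbleBitsA (c : Char) : List Char :=
  PySem.Chars.zfill (PySem.List.slice (PySem.Int.toBinChars0b ((PySem.Int.ofCharsBase? [c] 16).getD 0)) (some 2) none) 4

-- the 'while index < len(processed_str)' loop: each pass reads processed_str[index : index+6], i.e. the
-- first 6 chars of the remaining suffix, and moves index by 6, i.e. recurses on the suffix dropped by 6.
-- binary_val is always a 6-char '0'/'1' key, so BASE64_TABLE[binary_val] never raises; '?' is unreachable.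
def pvEncodeA : List Char → List Char
  | [] => []
  | p :: ps =>
    let binary := (p :: ps).take 6
    let binary_val := binary ++ List.replicate ((6 - binary.length % 6) % 6) '0'
    pvTableA.getD binary_val '?' :: pvEncodeA ((p :: ps).drop 6)
  termination_by l => l.length
  decreasing_by simp only [List.length_drop, List.length_cons]; omega

def hexToBase64Encode (input_string : String) : String :=
  let processed_str := input_string.toList.foldl (fun ps c => ps ++ pvNibbleBitsA c) []
  String.ofList (pvEncodeA processed_str)

-- ===== PORT B =====

def pvAlphabet : List Char :=
  "ABCDEFGHIJKLMNOPQRSTUVWXYZabcdefghijklmnopqrstuvwxyz0123456789+/".toList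

-- the inner 'while nbits >= 6' loop; ALPHABET indices are always < 64, so '?' is unreachable
def pvEmitB (acc : Int) (nbits : Nat) (chunks : List Char) : Int × Nat × List Char :=
  if nbits ≥ 6 then
    let nb := nbits - 6
    pvEmitB (PySem.Int.mod acc (2 ^ nb)) nb
      (chunks ++ [(PySem.List.pyGet? pvAlphabet (PySem.Int.floordiv acc (2 ^ nb))).getD '?'])
  else (acc, nbits, chunks)
  decreasing_by omega

-- one pass of the 'for ch in input_string' loop; int(ch, 16) raising ValueError is excluded by Pre_
def pvStepB (st : Int × Nat × List Char) (c : Char) : Int × Nat × List Char :=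
  pvEmitB (st.1 * 16 + (PySem.Int.ofCharsBase? [c] 16).getD 0) (st.2.1 + 4) st.2.2

-- the trailing 'if nbits > 0' emit plus ''.join
def pvFinishB (st : Int × Nat × List Char) : List Char :=
  if st.2.1 > 0 then
    st.2.2 ++ [(PySem.List.pyGet? pvAlphabet (st.1 * 2 ^ (6 - st.2.1))).getD '?']
  else st.2.2

def hexToBase64Encode_alt (input_string : String) : String :=
  String.ofList (pvFinishB (input_string.toList.foldl pvStepB (0, 0, [])))

-- ===== PRECONDITION & SPEC =====

def pvHexDigits : List Char := "0123456789abcdefABCDEF".toList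

-- A raises ValueError (int(character, 16)) as soon as any character is not a hex digit; those inputs
-- (and only those) are excluded.
def Pre_hexToBase64Encode (input_string : String) : Prop :=
  (input_string.toList.all fun c => pvHexDigits.contains c) = true
instance (input_string : String) : Decidable (Pre_hexToBase64Encode input_string) := by
  unfold Pre_hexToBase64Encode; infer_instance

def pvWitness_hexToBase64Encode : String := "49276d1A"

def Spec_hexToBase64Encode (input_string : String) (out : String) : Prop := out = hexToBase64Encode_alt input_string
instance (input_string : String) (out : String) : Decidable (Spec_hexToBase64Encode input_string out) := by unfold Spec_hexToBase64Encode; infer_instance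

-- ===== CLAIM (what is proved, stated in full; the proofs are below) =====
def Claim_equal_hexToBase64Encode : Prop := ∀ (input_string : String), Dom_hexToBase64Encode input_string → Pre_hexToBase64Encode input_string → Spec_hexToBase64Encode input_string (hexToBase64Encode input_string)

-- ===== LEMMAS AND PROOFS =====

-- value of a '0'/'1' string read as a binary numeral
def pvBitsVal (bs : List Char) : Nat :=
  bs.foldl (fun n c => 2 * n + (if c = '1' then 1 else 0)) 0

abbrev pvIsBits (bs : List Char) : Bool := bs.all fun c => c == '0' || c == '1'

lemma pvIsBits_iff (bs : List Char) : pvIsBits bs = true ↔ ∀ c ∈ bs, c = '0' ∨ c = '1' := by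
  simp [pvIsBits]

-- the nibble value of a hex digit
def pvHv (c : Char) : Nat := ((PySem.Int.ofCharsBase? [c] 16).getD 0).toNat

-- the canonical 4-bit expansion of a nibble value
def pvBits4 (v : Nat) : List Char :=
  [if v / 8 % 2 = 1 then '1' else '0', if v / 4 % 2 = 1 then '1' else '0',
   if v / 2 % 2 = 1 then '1' else '0', if v % 2 = 1 then '1' else '0']

lemma pvBitsVal_foldl (bs : List Char) (n : Nat) :
    bs.foldl (fun n c => 2 * n + (if c = '1' then 1 else 0)) n = n * 2 ^ bs.length + pvBitsVal bs := by
  induction bs generalizing n with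
  | nil => simp [pvBitsVal]
  | cons b bs ih =>
    simp only [pvBitsVal, List.foldl_cons, List.length_cons]
    rw [ih, ih]
    ring

lemma pvBitsVal_append (x y : List Char) :
    pvBitsVal (x ++ y) = pvBitsVal x * 2 ^ y.length + pvBitsVal y := by
  simp only [pvBitsVal, List.foldl_append]
  rw [pvBitsVal_foldl]
  rfl

lemma pvBitsVal_cons (b : Char) (bs : List Char) :
    pvBitsVal (b :: bs) = (if b = '1' then 1 else 0) * 2 ^ bs.length + pvBitsVal bs := by
  have h := pvBitsVal_append [b] bs
  simp only [List.singleton_append] at h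
  rw [h]
  norm_num [pvBitsVal]

lemma pvBitsVal_replicate_zero (k : Nat) : pvBitsVal (List.replicate k '0') = 0 := by
  induction k with
  | zero => rfl
  | succ k ih =>
    rw [List.replicate_succ, pvBitsVal_cons]
    simp [ih]

lemma pvIsBits_take (bs : List Char) (n : Nat) (h : pvIsBits bs = true) : pvIsBits (bs.take n) = true := by
  rw [pvIsBits_iff] at h ⊢
  exact fun c hc => h c (List.mem_of_mem_take hc)

lemma pvIsBits_drop (bs : List Char) (n : Nat) (h : pvIsBits bs = true) : pvIsBits (bs.drop n) = true := by
  rw [pvIsBits_iff] at h ⊢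
  exact fun c hc => h c (List.mem_of_mem_drop hc)

-- facts about the canonical expansion, checked by computation over the 16 nibble values
lemma pvBits4_facts : ∀ v : Nat, v < 16 →
    (pvBits4 v).length = 4 ∧ pvIsBits (pvBits4 v) = true ∧ pvBitsVal (pvBits4 v) = v ∧
    pvBitsVal ((pvBits4 v).take 2) = v / 4 ∧ pvBitsVal ((pvBits4 v).drop 2) = v % 4 ∧
    ((pvBits4 v).take 2).length = 2 ∧ ((pvBits4 v).drop 2).length = 2 := by
  decide

-- per-hex-digit facts: A's bit expansion is the canonical one, checked over the 22 hex digits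
lemma pvNib_facts : ∀ c ∈ pvHexDigits,
    pvNibbleBitsA c = pvBits4 (pvHv c) ∧ pvHv c < 16 ∧
    (PySem.Int.ofCharsBase? [c] 16).getD 0 = (pvHv c : Nat) := by
  intro c hc
  have hl : pvHexDigits = ['0','1','2','3','4','5','6','7','8','9','a','b','c','d','e','f','A','B','C','D','E','F'] := rfl
  rw [hl] at hc
  fin_cases hc <;> exact (by decide)

-- dict lookup on a 6-bit key equals alphabet indexing at its value
set_option maxRecDepth 100000 in
lemma pvTable_eq_alph (bs : List Char) (h6 : bs.length = 6) (hb : pvIsBits bs = true) :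
    pvTableA.getD bs '?' = (PySem.List.pyGet? pvAlphabet ((pvBitsVal bs : Nat) : Int)).getD '?' := by
  rw [pvIsBits_iff] at hb
  rcases bs with _ | ⟨a, _ | ⟨b, _ | ⟨c, _ | ⟨d, _ | ⟨e, _ | ⟨f, _ | ⟨g, t⟩⟩⟩⟩⟩⟩⟩ <;> simp at h6
  rcases hb a (by simp) with rfl | rfl <;>
  rcases hb b (by simp) with rfl | rfl <;>
  rcases hb c (by simp) with rfl | rfl <;>
  rcases hb d (by simp) with rfl | rfl <;>
  rcases hb e (by simp) with rfl | rfl <;>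
  rcases hb f (by simp) with rfl | rfl <;> decide

-- A's chunk loop on a full leading 6-bit chunk
lemma pvEncodeA_chunk (x rest : List Char) (h6 : x.length = 6) (hb : pvIsBits x = true) :
    pvEncodeA (x ++ rest) =
      (PySem.List.pyGet? pvAlphabet ((pvBitsVal x : Nat) : Int)).getD '?' :: pvEncodeA rest := by
  obtain ⟨p, ps, rfl⟩ : ∃ p ps, x = p :: ps := by
    cases x with
    | nil => simp at h6
    | cons p ps => exact ⟨p, ps, rfl⟩
  rw [List.cons_append, pvEncodeA]
  have htake : (p :: (ps ++ rest)).take 6 = p :: ps := by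
    rw [← List.cons_append, List.take_left' h6]
  have hdrop : (p :: (ps ++ rest)).drop 6 = rest := by
    rw [← List.cons_append, List.drop_left' h6]
  simp only [htake, hdrop, h6]
  norm_num
  simpa using pvTable_eq_alph _ h6 hb

-- A's chunk loop on a trailing partial chunk of 2 or 4 bits
lemma pvEncodeA_partial (x : List Char) (hl : x.length = 2 ∨ x.length = 4) (hb : pvIsBits x = true) :
    pvEncodeA x =
      [(PySem.List.pyGet? pvAlphabet ((pvBitsVal x * 2 ^ (6 - x.length) : Nat) : Int)).getD '?'] := by
  obtain ⟨p, ps, rfl⟩ : ∃ p ps, x = p :: ps := by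
    cases x with
    | nil => simp at hl
    | cons p ps => exact ⟨p, ps, rfl⟩
  rw [pvEncodeA]
  have hle : (p :: ps).length ≤ 6 := by rcases hl with h | h <;> omega
  have htake : (p :: ps).take 6 = p :: ps := List.take_of_length_le hle
  have hdrop : (p :: ps).drop 6 = [] := List.drop_eq_nil_of_le hle
  have hpad : (6 - (p :: ps).length % 6) % 6 = 6 - (p :: ps).length := by
    rcases hl with h | h <;> omega
  rw [htake, hdrop, hpad]
  have hkey6 : ((p :: ps) ++ List.replicate (6 - (p :: ps).length) '0').length = 6 := by
    simp only [List.length_append, List.length_replicate]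
    rcases hl with h | h <;> omega
  have hkeyb : pvIsBits ((p :: ps) ++ List.replicate (6 - (p :: ps).length) '0') = true := by
    rw [pvIsBits_iff] at hb ⊢
    intro c hc
    rcases List.mem_append.mp hc with h | h
    · exact hb c h
    · left; exact List.eq_of_mem_replicate h
  rw [pvTable_eq_alph _ hkey6 hkeyb, pvBitsVal_append, pvBitsVal_replicate_zero,
    List.length_replicate]
  simp [pvEncodeA]

-- one emit step of B's inner while loop, on a natural-number buffer
lemma pvEmitB_stop (acc : Int) (nbits : Nat) (out : List Char) (h : nbits < 6) :
    pvEmitB acc nbits out = (acc, nbits, out) := by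
  rw [pvEmitB]
  simp [Nat.not_le.mpr h]

lemma pvEmitB_six (n : Nat) (out : List Char) :
    pvEmitB (n : Int) 6 out = (0, 0, out ++ [(PySem.List.pyGet? pvAlphabet ((n : Nat) : Int)).getD '?']) := by
  rw [pvEmitB]
  norm_num
  exact pvEmitB_stop _ _ _ (by omega)

lemma pvEmitB_eight (n : Nat) (out : List Char) :
    pvEmitB (n : Int) 8 out =
      (((n % 4 : Nat) : Int), 2, out ++ [(PySem.List.pyGet? pvAlphabet ((n / 4 : Nat) : Int)).getD '?']) := by
  rw [pvEmitB]
  norm_num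
  exact pvEmitB_stop _ _ _ (by omega)

-- the main streaming invariant: running B's loop from a pending buffer of 0/2/4 bits equals A's
-- chunked encoding of the pending bits followed by the expanded bits of the remaining hex digits
lemma pvMain (cs : List Char) (hcs : ∀ c ∈ cs, c ∈ pvHexDigits)
    (pend : List Char) (out : List Char) (hb : pvIsBits pend = true)
    (hl : pend.length = 0 ∨ pend.length = 2 ∨ pend.length = 4) :
    pvFinishB (cs.foldl pvStepB (((pvBitsVal pend : Nat) : Int), pend.length, out)) =
      out ++ pvEncodeA (pend ++ cs.flatMap pvNibbleBitsA) := by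
  induction cs generalizing pend out with
  | nil =>
    simp only [List.foldl_nil, List.flatMap_nil, List.append_nil]
    rcases hl with h0 | hl
    · rw [List.eq_nil_of_length_eq_zero h0]
      simp [pvFinishB, pvEncodeA]
    · have hpos : pend.length > 0 := by omega
      rw [pvEncodeA_partial pend hl hb]
      simp only [pvFinishB, hpos, if_pos]
      rw [show ((pvBitsVal pend : Nat) : Int) * 2 ^ (6 - pend.length)
          = ((pvBitsVal pend * 2 ^ (6 - pend.length) : Nat) : Int) by push_cast; ring]
  | cons c cs ih =>
    have hc := pvNib_facts c (hcs c (by simp))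
    obtain ⟨hnib, hv16, hcast⟩ := hc
    have hcs' : ∀ c' ∈ cs, c' ∈ pvHexDigits := fun c' h => hcs c' (by simp [h])
    obtain ⟨hb4len, hb4bits, hb4val, hb4take, hb4drop, hb4tl, hb4dl⟩ := pvBits4_facts (pvHv c) hv16
    simp only [List.foldl_cons, List.flatMap_cons, hnib]
    rw [show pvStepB (((pvBitsVal pend : Nat) : Int), pend.length, out) c
        = pvEmitB (((pvBitsVal pend * 16 + pvHv c : Nat) : Int)) (pend.length + 4) out by
      simp only [pvStepB, hcast]; push_cast; ring_nf]
    rcases hl with h0 | h2 | h4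
    · -- no emission: the 4 new bits stay pending
      rw [List.eq_nil_of_length_eq_zero h0] at *
      rw [h0, pvEmitB_stop _ _ _ (by omega)]
      have hzero : pvBitsVal ([] : List Char) = 0 := rfl
      have := ih hcs' (pvBits4 (pvHv c)) out hb4bits (by omega)
      rw [hb4val, hb4len] at this
      simpa [hzero] using this
    · -- 2 pending + 4 new = one full chunk, buffer empties
      rw [h2, pvEmitB_six]
      have hchunk : pvIsBits (pend ++ pvBits4 (pvHv c)) = true := by
        rw [pvIsBits_iff] at hb hb4bits ⊢
        intro x hx
        rcases List.mem_append.mp hx with h | h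
        · exact hb x h
        · exact hb4bits x h
      have hclen : (pend ++ pvBits4 (pvHv c)).length = 6 := by simp [hb4len, h2]
      rw [← List.append_assoc, pvEncodeA_chunk _ _ hclen hchunk]
      have := ih hcs' [] (out ++ [(PySem.List.pyGet? pvAlphabet
          ((pvBitsVal pend * 16 + pvHv c : Nat) : Int)).getD '?']) (by rfl) (by simp)
      simp only [List.length_nil, List.nil_append] at this
      rw [show pvBitsVal ([] : List Char) = 0 from rfl] at this
      rw [show ((0 : Nat) : Int) = 0 from rfl] at this
      rw [this, pvBitsVal_append, hb4val, hb4len]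
      norm_num [List.append_assoc]
    · -- 4 pending + 4 new: one chunk out, 2 bits stay pending
      rw [h4, pvEmitB_eight]
      set w := pvHv c with hw
      have hsplit : pvBits4 w = (pvBits4 w).take 2 ++ (pvBits4 w).drop 2 :=
        (List.take_append_drop 2 (pvBits4 w)).symm
      have hchunk : pvIsBits (pend ++ (pvBits4 w).take 2) = true := by
        rw [pvIsBits_iff] at hb ⊢
        intro x hx
        rcases List.mem_append.mp hx with h | h
        · exact hb x h
        · exact (pvIsBits_iff _).mp (pvIsBits_take _ 2 hb4bits) x h
      have hclen : (pend ++ (pvBits4 w).take 2).length = 6 := by simp [hb4tl, h4]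
      rw [show pend ++ (pvBits4 w ++ cs.flatMap pvNibbleBitsA)
          = (pend ++ (pvBits4 w).take 2) ++ ((pvBits4 w).drop 2 ++ cs.flatMap pvNibbleBitsA) by
        conv_lhs => rw [hsplit]
        simp only [List.append_assoc]]
      rw [pvEncodeA_chunk _ _ hclen hchunk]
      have hdval : ((pvBitsVal pend * 16 + w) % 4 : Nat) = pvBitsVal ((pvBits4 w).drop 2) := by
        rw [hb4drop]; omega
      have hcval : ((pvBitsVal pend * 16 + w) / 4 : Nat) = pvBitsVal (pend ++ (pvBits4 w).take 2) := by
        rw [pvBitsVal_append, hb4take, hb4tl]; omega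
      have := ih hcs' ((pvBits4 w).drop 2)
        (out ++ [(PySem.List.pyGet? pvAlphabet (((pvBitsVal pend * 16 + w) / 4 : Nat) : Int)).getD '?'])
        (pvIsBits_drop _ 2 hb4bits) (by omega)
      rw [hb4dl] at this
      rw [← hdval] at this
      rw [this, hcval]
      simp

-- ===== VERDICT (by name: the statement is the Claim_ definition above) =====
theorem hexToBase64Encode_spec : Claim_equal_hexToBase64Encode := by
  intro s _ hpre
  unfold Spec_hexToBase64Encode hexToBase64Encode hexToBase64Encode_alt
  rw [PySem.List.foldl_append_eq_flatMap]
  have hpre' : ∀ c ∈ s.toList, c ∈ pvHexDigits := by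
    simpa [Pre_hexToBase64Encode, List.all_eq_true] using hpre
  have := pvMain s.toList hpre' [] [] (by rfl) (by simp)
  simp only [List.length_nil, List.nil_append,
    show pvBitsVal ([] : List Char) = 0 from rfl, Nat.cast_zero] at this
  exact congrArg String.ofList this.symm
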